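-- pv_equiv track=rewrite | github.com/amoghghadge/DSA-Playground | Sample Problems/make_median_x.py | solution
-- ===== SOURCE A (Python) =====
-- def solution(nums, x):
--     nums.sort()
--     ops = 0
--
--     for i in range(len(nums)//2):
--         ops += max(nums[i]-x, 0)
--
--     ops += abs(nums[len(nums)//2]-x)
--
--     for i in range((len(nums)//2)+1, len(nums)):
--         ops += max(x-nums[i], 0)
--
--     return ops
-- ===== SOURCE B (Python) =====
-- def solution(nums, x):
--     # Counting-partition approach: no full sort; only the one side that actually
--     # contributes is sorted. (Unlike A, does not mutate nums.)
--     m = len(nums) // 2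
--     lows = [v for v in nums if v < x]
--     highs = [v for v in nums if v > x]
--     le = len(nums) - len(highs)          # count of values <= x
--     if le <= m:
--         k = m + 1 - le
--         highs.sort()
--         return sum(highs[:k]) - k * x
--     if len(lows) > m:
--         k = len(lows) - m
--         lows.sort()
--         return k * x - sum(lows[-k:])
--     return 0
-- ===== Notes on version B (the rewrite author's own statement) =====
-- stated objective: faster
-- what changed: A sorts the whole list and sums three indexed loops over it; B never builds the sorted list: it counts/partitions nums around x in one pass and, in only the branch that contributes, sorts that single partition and sums a slice of it in closed form (k*x plus a partial sum).
-- outside the precondition, e.g. on solution([], 0): A raises IndexError, B returns 0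
import Mathlib
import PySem

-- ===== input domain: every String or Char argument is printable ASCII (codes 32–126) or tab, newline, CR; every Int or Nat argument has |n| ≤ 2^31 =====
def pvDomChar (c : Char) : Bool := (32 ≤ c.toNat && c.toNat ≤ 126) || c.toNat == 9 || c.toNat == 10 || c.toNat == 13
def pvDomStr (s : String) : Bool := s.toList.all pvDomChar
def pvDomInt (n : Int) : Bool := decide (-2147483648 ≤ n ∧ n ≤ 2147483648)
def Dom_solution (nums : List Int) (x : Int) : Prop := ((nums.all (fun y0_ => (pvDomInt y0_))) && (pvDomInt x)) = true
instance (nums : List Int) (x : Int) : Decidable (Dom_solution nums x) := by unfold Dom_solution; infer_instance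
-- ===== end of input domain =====

-- B replaces A's full sort + three index loops by a counting partition that sorts (at most) the one
-- side of x that actually contributes; objective: faster (constant factor). A sorts nums in place;
-- the equivalence proved here is about the return value only (B does not mutate nums).

-- ===== PORT A =====
def solution (nums : List Int) (x : Int) : Int :=
  let s := PySem.List.sorted nums (fun v => v) false
  (PySem.List.pyRange (PySem.Int.floordiv (s.length : Int) 2 + 1) (s.length : Int)).foldl
    (fun acc i => acc + max (x - PySem.List.pyGetD s i 0) 0)
    (((PySem.List.pyRange 0 (PySem.Int.floordiv (s.length : Int) 2)).foldl
        (fun acc i => acc + max (PySem.List.pyGetD s i 0 - x) 0) 0)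
      + |PySem.List.pyGetD s (PySem.Int.floordiv (s.length : Int) 2) 0 - x|)

-- ===== PORT B =====
def solution_alt (nums : List Int) (x : Int) : Int :=
  let m := PySem.Int.floordiv (nums.length : Int) 2
  let lows := nums.filter (fun v => decide (v < x))
  let highs := nums.filter (fun v => decide (x < v))
  let le : Int := (nums.length : Int) - (highs.length : Int)
  if le ≤ m then
    let k := m + 1 - le
    (PySem.List.slice (PySem.List.sorted highs (fun v => v) false) none (some k)).sum - k * x
  else if (lows.length : Int) > m then
    let k := (lows.length : Int) - m
    k * x - (PySem.List.slice (PySem.List.sorted lows (fun v => v) false) (some (-k)) none).sum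
  else 0

-- ===== PRECONDITION & SPEC =====
-- Pre_ excludes only the empty list, on which A raises IndexError at nums[len(nums)//2].
def Pre_solution (nums : List Int) (x : Int) : Prop := nums ≠ []
instance (nums : List Int) (x : Int) : Decidable (Pre_solution nums x) := by unfold Pre_solution; infer_instance
def pvWitness_solution : List Int × Int := ([1, 2, 3], 2)

def Spec_solution (nums : List Int) (x : Int) (out : Int) : Prop := out = solution_alt nums x
instance (nums : List Int) (x : Int) (out : Int) : Decidable (Spec_solution nums x out) := by unfold Spec_solution; infer_instance

-- ===== CLAIM (what is proved, stated in full; the proofs are below) =====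
def Claim_equal_solution : Prop := ∀ (nums : List Int) (x : Int), Dom_solution nums x → Pre_solution nums x → Spec_solution nums x (solution nums x)

-- ===== LEMMAS AND PROOFS =====

-- A for-loop over range(a, b) summing a function of s[i] is a sum over the segment s[a:b].
theorem segSum (s : List Int) (g : Int → Int) (a b : Nat) (hab : a ≤ b) (hb : b ≤ s.length) (c : Int) :
    (PySem.List.pyRange (a : Int) (b : Int)).foldl (fun acc i => acc + g (PySem.List.pyGetD s i 0)) c
      = c + (((s.drop a).take (b - a)).map g).sum := by
  induction b, hab using Nat.le_induction with
  | base => simp [PySem.List.pyRange]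
  | succ b hab ih =>
      have hb' : b ≤ s.length := by omega
      have hbl : b < s.length := by omega
      have hcast : ((b + 1 : Nat) : Int) = (b : Int) + 1 := by push_cast; ring
      rw [hcast, PySem.List.pyRange_one_succ_right (by exact_mod_cast hab), List.foldl_append,
        ih hb']
      simp only [List.foldl_cons, List.foldl_nil]
      rw [PySem.List.pyGetD_eq_getElem s 0 (by positivity) (by exact_mod_cast hbl)]
      have h1 : b + 1 - a = (b - a) + 1 := by omega
      have h2 : (s.drop a)[b - a]? = some s[b] := by
        rw [List.getElem?_drop]
        have h3 : a + (b - a) = b := by omega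
        rw [h3, List.getElem?_eq_getElem hbl]
      rw [h1, List.take_add_one, h2]
      simp [List.sum_append]
      ring

-- nums is, up to permutation, the concatenation of its three comparison classes against x.
theorem triPerm (nums : List Int) (x : Int) :
    (nums.filter (fun v => decide (v < x)) ++ nums.filter (fun v => decide (v = x))
      ++ nums.filter (fun v => decide (x < v))).Perm nums := by
  induction nums with
  | nil => simp
  | cons a t ih =>
      rcases lt_trichotomy a x with h | h | h
      · simpa [List.filter_cons, h, ne_of_lt h, not_lt.mpr h.le] using ih.cons a
      · simp only [List.filter_cons]
        rw [if_neg (by simp [h]), if_pos (by simp [h]), if_neg (by simp [h])]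
        exact (List.Perm.append_right _ List.perm_middle).trans (ih.cons a)
      · simp only [List.filter_cons]
        rw [if_neg (by simp [not_lt.mpr h.le]), if_neg (by simp [ne_of_gt h]), if_pos (by simp [h])]
        exact List.perm_middle.trans (ih.cons a)

-- the all-equal middle block is trivially sorted
theorem pairwiseConst (x : Int) (l : List Int) (h : ∀ v ∈ l, v = x) :
    l.Pairwise (fun a b => a ≤ b) := by
  induction l with
  | nil => exact List.Pairwise.nil
  | cons a t ih =>
      refine List.Pairwise.cons (fun b hb => ?_) (ih (fun v hv => h v (List.mem_cons_of_mem a hv)))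
      rw [h a List.mem_cons_self, h b (List.mem_cons_of_mem a hb)]

-- sorted nums splits as (sorted lows) ++ equals ++ (sorted highs).
theorem sortedDecomp (nums : List Int) (x : Int) :
    PySem.List.sorted nums (fun v => v) false
      = PySem.List.sorted (nums.filter (fun v => decide (v < x))) (fun v => v) false
        ++ nums.filter (fun v => decide (v = x))
        ++ PySem.List.sorted (nums.filter (fun v => decide (x < v))) (fun v => v) false := by
  have hL : ∀ v ∈ PySem.List.sorted (nums.filter (fun v => decide (v < x))) (fun v => v) false, v < x := by
    intro v hv
    have := (PySem.List.mem_sorted _ _ _ _).mp hv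
    simpa using (List.mem_filter.mp this).2
  have hE : ∀ v ∈ nums.filter (fun v => decide (v = x)), v = x := by
    intro v hv; simpa using (List.mem_filter.mp hv).2
  have hH : ∀ v ∈ PySem.List.sorted (nums.filter (fun v => decide (x < v))) (fun v => v) false, x < v := by
    intro v hv
    have := (PySem.List.mem_sorted _ _ _ _).mp hv
    simpa using (List.mem_filter.mp this).2
  apply PySem.List.sorted_id_eq_of_perm_of_pairwise
  · exact (((PySem.List.sorted_perm _ _ _).append (List.Perm.refl _)).append
      (PySem.List.sorted_perm _ _ _)).trans (triPerm nums x)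
  · rw [List.pairwise_append]
    refine ⟨?_, ?_, ?_⟩
    · rw [List.pairwise_append]
      refine ⟨?_, pairwiseConst x _ hE, ?_⟩
      · exact PySem.List.sorted_pairwise _ (fun v : Int => v)
      · intro a ha b hb
        exact le_of_lt (lt_of_lt_of_le (hL a ha) (ge_of_eq (hE b hb)))
    · exact PySem.List.sorted_pairwise _ (fun v : Int => v)
    · intro a ha b hb
      rcases List.mem_append.mp ha with ha | ha
      · exact le_of_lt (lt_of_lt_of_le (hL a ha) (le_of_lt (hH b hb)))
      · exact le_of_lt (lt_of_le_of_lt (le_of_eq (hE a ha)) (hH b hb))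

theorem sumNegInt (t : List Int) : (t.map (fun v => -v)).sum = -t.sum := by
  induction t with
  | nil => simp
  | cons a u ihu => simp only [List.map_cons, List.sum_cons, ihu]; ring

-- a sum of max(v-x,0) over values ≤ x vanishes
theorem sumF_zero (x : Int) (t : List Int) (ht : ∀ v ∈ t, v ≤ x) :
    (t.map (fun v => max (v - x) 0)).sum = 0 := by
  apply List.sum_eq_zero
  intro y hy
  obtain ⟨v, hv, rfl⟩ := List.mem_map.mp hy
  have := ht v hv; omega

theorem sumG_zero (x : Int) (t : List Int) (ht : ∀ v ∈ t, x ≤ v) :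
    (t.map (fun v => max (x - v) 0)).sum = 0 := by
  apply List.sum_eq_zero
  intro y hy
  obtain ⟨v, hv, rfl⟩ := List.mem_map.mp hy
  have := ht v hv; omega

-- on values > x the summand max(v-x,0) is linear
theorem sumF_lin (x : Int) (t : List Int) (ht : ∀ v ∈ t, x < v) :
    (t.map (fun v => max (v - x) 0)).sum = t.sum - (t.length : Int) * x := by
  have h1 : t.map (fun v => max (v - x) 0) = t.map (fun v => v + (-x)) := by
    apply List.map_congr_left
    intro v hv; have := ht v hv; omega
  rw [h1, PySem.List.sum_map_add_int, PySem.List.sum_map_const_int]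
  simp [List.map_id']
  ring

theorem sumG_lin (x : Int) (t : List Int) (ht : ∀ v ∈ t, v < x) :
    (t.map (fun v => max (x - v) 0)).sum = (t.length : Int) * x - t.sum := by
  have h1 : t.map (fun v => max (x - v) 0) = t.map (fun v => -v + x) := by
    apply List.map_congr_left
    intro v hv; have := ht v hv; omega
  rw [h1, PySem.List.sum_map_add_int, PySem.List.sum_map_const_int]
  rw [sumNegInt t]; ring

theorem absSplit (a b : Int) : |a - b| = max (a - b) 0 + max (b - a) 0 := by
  rcases abs_cases (a - b) with ⟨h1, h2⟩ | ⟨h1, h2⟩ <;> omega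

theorem solution_eq (nums : List Int) (x : Int) (h : nums ≠ []) :
    solution nums x = solution_alt nums x := by
  have hn0 : 0 < nums.length := List.length_pos_of_ne_nil h
  set F1 := nums.filter (fun v => decide (v < x)) with hF1
  set F2 := nums.filter (fun v => decide (v = x)) with hF2
  set F3 := nums.filter (fun v => decide (x < v)) with hF3
  set L := PySem.List.sorted F1 (fun v => v) false with hLdef
  set H := PySem.List.sorted F3 (fun v => v) false with hHdef
  have hsplit : PySem.List.sorted nums (fun v => v) false = L ++ F2 ++ H := sortedDecomp nums x
  have hLlen : L.length = F1.length := PySem.List.length_sorted F1 _ false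
  have hHlen : H.length = F3.length := PySem.List.length_sorted F3 _ false
  have hlen : nums.length = L.length + F2.length + H.length := by
    have hp := (PySem.List.sorted_perm nums (fun v : Int => v) false).length_eq
    rw [hsplit] at hp
    simp at hp
    omega
  have hslen : (PySem.List.sorted nums (fun v => v) false).length = nums.length :=
    PySem.List.length_sorted nums _ false
  have hmn : nums.length / 2 < nums.length := Nat.div_lt_self hn0 one_lt_two
  have hfd : PySem.Int.floordiv ((nums.length : Nat) : Int) 2 = ((nums.length / 2 : Nat) : Int) := by
    exact_mod_cast PySem.Int.floordiv_natCast nums.length 2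
  have hLmem : ∀ v ∈ L, v < x := by
    intro v hv
    have hm := (PySem.List.mem_sorted _ _ _ _).mp hv
    rw [hF1] at hm
    simpa using (List.mem_filter.mp hm).2
  have hEmem : ∀ v ∈ F2, v = x := by
    intro v hv
    rw [hF2] at hv
    simpa using (List.mem_filter.mp hv).2
  have hHmem : ∀ v ∈ H, x < v := by
    intro v hv
    have hm := (PySem.List.mem_sorted _ _ _ _).mp hv
    rw [hF3] at hm
    simpa using (List.mem_filter.mp hm).2
  have hm' : nums.length / 2 < (PySem.List.sorted nums (fun v => v) false).length := by
    rw [hslen]; exact hmn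
  -- A's value is the f-sum over s[0:m+1] plus the g-sum over s[m:], s = sorted nums, m = n//2
  have hA : solution nums x
      = (((PySem.List.sorted nums (fun v => v) false).take (nums.length / 2 + 1)).map
            (fun v => max (v - x) 0)).sum
        + (((PySem.List.sorted nums (fun v => v) false).drop (nums.length / 2)).map
            (fun v => max (x - v) 0)).sum := by
    simp only [solution]
    rw [hslen, hfd]
    rw [show PySem.List.pyRange (0 : Int) ((nums.length / 2 : Nat) : Int)
        = PySem.List.pyRange (((0 : Nat) : Int)) ((nums.length / 2 : Nat) : Int) from rfl]
    rw [show ((nums.length / 2 : Nat) : Int) + 1 = ((nums.length / 2 + 1 : Nat) : Int) by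
      push_cast; ring]
    have hseg1 := segSum (PySem.List.sorted nums (fun v => v) false) (fun v => max (v - x) 0) 0
      (nums.length / 2) (Nat.zero_le _) (le_of_lt hm') 0
    have hseg2 := fun c => segSum (PySem.List.sorted nums (fun v => v) false)
      (fun v => max (x - v) 0) (nums.length / 2 + 1) nums.length (by omega)
      (le_of_eq hslen.symm) c
    rw [hseg2, hseg1]
    rw [PySem.List.pyGetD_eq_getElem (PySem.List.sorted nums (fun v => v) false) 0
      (by positivity) (by exact_mod_cast hm')]
    simp only [Int.toNat_natCast]
    rw [absSplit]
    simp only [List.drop_zero, Nat.sub_zero]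
    have hdt : ((PySem.List.sorted nums (fun v => v) false).drop (nums.length / 2 + 1)).take
        (nums.length - (nums.length / 2 + 1))
        = (PySem.List.sorted nums (fun v => v) false).drop (nums.length / 2 + 1) :=
      List.take_of_length_le (by simp [hslen])
    rw [hdt]
    have htk : (PySem.List.sorted nums (fun v => v) false).take (nums.length / 2 + 1)
        = (PySem.List.sorted nums (fun v => v) false).take (nums.length / 2)
          ++ [(PySem.List.sorted nums (fun v => v) false)[nums.length / 2]'hm'] := by
      rw [List.take_add_one, List.getElem?_eq_getElem hm']
      simp
    rw [htk, List.drop_eq_getElem_cons hm', List.map_append, List.sum_append]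
    simp only [List.map_cons, List.map_nil, List.sum_cons, List.sum_nil]
    ring
  by_cases hc1 : L.length + F2.length ≤ nums.length / 2
  · -- x sits at or below the lower end of the highs: only highs below index m+1 contribute
    rw [hA, hsplit]
    rw [List.take_append, List.take_append, List.drop_append, List.drop_append]
    simp only [List.length_append]
    have e1 : L.take (nums.length / 2 + 1) = L := List.take_of_length_le (by omega)
    have e2 : F2.take (nums.length / 2 + 1 - L.length) = F2 := List.take_of_length_le (by omega)
    have e3 : L.drop (nums.length / 2) = [] := List.drop_eq_nil_of_le (by omega)
    have e4 : F2.drop (nums.length / 2 - L.length) = [] := List.drop_eq_nil_of_le (by omega)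
    rw [e1, e2, e3, e4]
    simp only [List.nil_append, List.map_append, List.sum_append]
    rw [sumF_zero x L (fun v hv => le_of_lt (hLmem v hv)),
      sumF_zero x F2 (fun v hv => le_of_eq (hEmem v hv)),
      sumF_lin x _ (fun v hv => hHmem v (List.mem_of_mem_take hv)),
      sumG_zero x _ (fun v hv => le_of_lt (hHmem v (List.mem_of_mem_drop hv)))]
    have hlenk : ((H.take (nums.length / 2 + 1 - (L.length + F2.length))).length : Int)
        = ((nums.length / 2 + 1 - (L.length + F2.length) : Nat) : Int) := by
      simp only [List.length_take]
      congr 1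
      omega
    rw [hlenk]
    -- B takes its first branch
    simp only [solution_alt]
    rw [← hF1, ← hF3, ← hLdef, ← hHdef, hfd]
    rw [if_pos (by omega)]
    rw [show ((nums.length / 2 : Nat) : Int) + 1 - ((nums.length : Int) - (F3.length : Int))
        = ((nums.length / 2 + 1 - (L.length + F2.length) : Nat) : Int) by omega]
    rw [PySem.List.slice_to _ (by positivity)]
    rw [Int.toNat_natCast]
    ring
  · by_cases hc2 : nums.length / 2 < L.length
    · -- x sits above the top of the lows: only lows from index m on contribute
      rw [hA, hsplit]
      rw [List.take_append, List.take_append, List.drop_append, List.drop_append]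
      simp only [List.length_append]
      rw [show nums.length / 2 + 1 - (L.length + F2.length) = 0 by omega,
        show nums.length / 2 + 1 - L.length = 0 by omega,
        show nums.length / 2 - (L.length + F2.length) = 0 by omega,
        show nums.length / 2 - L.length = 0 by omega]
      simp only [List.take_zero, List.drop_zero, List.append_nil, List.map_append,
        List.sum_append]
      rw [sumF_zero x _ (fun v hv => le_of_lt (hLmem v (List.mem_of_mem_take hv))),
        sumG_lin x _ (fun v hv => hLmem v (List.mem_of_mem_drop hv)),
        sumG_zero x F2 (fun v hv => le_of_eq (hEmem v hv).symm),
        sumG_zero x H (fun v hv => le_of_lt (hHmem v hv))]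
      have hlenk : (((L.drop (nums.length / 2)).length : Nat) : Int)
          = ((L.length - nums.length / 2 : Nat) : Int) := by
        simp [List.length_drop]
      rw [hlenk]
      -- B takes its second branch
      simp only [solution_alt]
      rw [← hF1, ← hF3, ← hLdef, ← hHdef, hfd]
      rw [if_neg (by omega)]
      rw [if_pos (by omega)]
      rw [show -((F1.length : Int) - ((nums.length / 2 : Nat) : Int))
          = -((L.length - nums.length / 2 : Nat) : Int) by omega]
      rw [PySem.List.slice_from_neg_natCast L _ (by omega)]
      rw [show L.length - (L.length - nums.length / 2) = nums.length / 2 by omega]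
      rw [Nat.cast_sub (le_of_lt hc2), hLlen]
      ring
    · -- x is itself the median value: nothing contributes on either side
      rw [hA, hsplit]
      rw [List.take_append, List.take_append, List.drop_append, List.drop_append]
      simp only [List.length_append]
      rw [show nums.length / 2 + 1 - (L.length + F2.length) = 0 by omega,
        show nums.length / 2 - (L.length + F2.length) = 0 by omega]
      have e1 : L.take (nums.length / 2 + 1) = L := List.take_of_length_le (by omega)
      have e3 : L.drop (nums.length / 2) = [] := List.drop_eq_nil_of_le (by omega)
      rw [e1, e3]
      simp only [List.take_zero, List.drop_zero, List.append_nil, List.nil_append,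
        List.map_append, List.sum_append]
      rw [sumF_zero x L (fun v hv => le_of_lt (hLmem v hv)),
        sumF_zero x _ (fun v hv => le_of_eq (hEmem v (List.mem_of_mem_take hv))),
        sumG_zero x _ (fun v hv => le_of_eq (hEmem v (List.mem_of_mem_drop hv)).symm),
        sumG_zero x H (fun v hv => le_of_lt (hHmem v hv))]
      -- B takes neither branch
      simp only [solution_alt]
      rw [← hF1, ← hF3, hfd]
      rw [if_neg (by omega), if_neg (by omega)]
      ring

-- ===== VERDICT (by name: the statement is the Claim_ definition above) =====
theorem solution_spec : Claim_equal_solution := by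
  intro nums x _ hpre
  unfold Spec_solution
  exact solution_eq nums x hpre
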